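-- pv_equiv track=rewrite | github.com/pabdan2003/circuit-sim | main.py | _qm_minimum_cover
-- ===== SOURCE A (Python) =====
-- def _qm_covers(prime: str, term: int, num_vars: int) -> bool:
--     bin_t = format(term, f'0{num_vars}b')
--     return all(p == '-' or p == m for p, m in zip(prime, bin_t))
--
-- def _qm_minimum_cover(primes, must_cover, num_vars: int):
--     """Cobertura mínima de must_cover usando los primes disponibles.
--     Algoritmo: implicantes esenciales primero, luego greedy para el resto."""
--     if not must_cover:
--         return []
--     coverage = {p: {m for m in must_cover if _qm_covers(p, m, num_vars)}
--                 for p in primes}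
--     selected, remaining = set(), set(must_cover)
--     while remaining:
--         # Esenciales: mintérminos cubiertos por solo un implicante primo
--         essential_added = False
--         for m in list(remaining):
--             covers_m = [p for p in primes if m in coverage[p]]
--             if len(covers_m) == 1:
--                 p = covers_m[0]
--                 if p not in selected:
--                     selected.add(p)
--                     essential_added = True
--                 remaining -= coverage[p]
--         if remaining and not essential_added:
--             # Greedy: el prime que cubra más mintérminos restantes
--             best, best_n = None, -1
--             for p in primes:
--                 n = len(coverage[p] & remaining)
--                 if n > best_n:
--                     best, best_n = p, n
--             if best is None or best_n <= 0:
--                 break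
--             selected.add(best)
--             remaining -= coverage[best]
--     return list(selected)
-- ===== SOURCE B (Python) =====
-- def _covers(prime: str, term: int, num_vars: int) -> bool:
--     bin_t = format(term, f'0{num_vars}b')
--     return all(p == '-' or p == m for p, m in zip(prime, bin_t))
--
-- def _qm_minimum_cover(primes, must_cover, num_vars: int):
--     """Minimum-ish cover: essentials computed ONCE via a term->covering-primes
--     index, then a pure greedy loop (no repeated essential re-scans)."""
--     if not must_cover:
--         return []
--     coverage = {p: {m for m in must_cover if _covers(p, m, num_vars)}
--                 for p in primes}
--     # term -> list of primes (with multiplicity, in primes order) covering it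
--     idx = {m: [p for p in primes if m in coverage[p]] for m in must_cover}
--     selected = set()
--     remaining = set(must_cover)
--     # essentials: a single pass, no while loop
--     for m in must_cover:
--         ps = idx[m]
--         if len(ps) == 1:
--             selected.add(ps[0])
--             remaining -= coverage[ps[0]]
--     # greedy: first prime covering the most remaining terms, until stuck
--     while remaining:
--         best = max(primes, key=lambda p: len(coverage[p] & remaining), default=None)
--         if best is None or not (coverage[best] & remaining):
--             break
--         selected.add(best)
--         remaining -= coverage[best]
--     return list(selected)
-- ===== Notes on version B (the rewrite author's own statement) =====
-- stated objective: alternative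
-- what changed: A re-scans all remaining terms against all primes (rebuilding every covers_m list) on every iteration of its while loop; B builds a term->covering-primes index once, takes the essential implicants in a single pass over must_cover, and then runs a pure greedy loop with no essential re-scans.
import Mathlib
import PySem

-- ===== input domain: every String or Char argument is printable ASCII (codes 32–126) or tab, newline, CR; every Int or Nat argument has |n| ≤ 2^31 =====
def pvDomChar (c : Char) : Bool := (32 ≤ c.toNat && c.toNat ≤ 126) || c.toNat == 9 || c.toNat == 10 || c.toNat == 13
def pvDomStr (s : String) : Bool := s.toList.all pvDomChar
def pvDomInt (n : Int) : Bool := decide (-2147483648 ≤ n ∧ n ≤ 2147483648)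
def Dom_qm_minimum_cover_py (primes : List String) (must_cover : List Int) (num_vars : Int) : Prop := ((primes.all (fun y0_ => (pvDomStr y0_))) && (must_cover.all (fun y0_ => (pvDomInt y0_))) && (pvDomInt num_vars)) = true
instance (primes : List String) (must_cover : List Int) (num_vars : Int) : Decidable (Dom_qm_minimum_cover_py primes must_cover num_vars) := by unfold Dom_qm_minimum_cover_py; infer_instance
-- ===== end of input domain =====

-- ===== PORT A =====
-- B changes: term->covering-primes index built once, essentials in a single pass,
-- then a pure greedy loop (no repeated essential re-scans); return-value equivalence.
-- shared leaf helpers: both Pythons compute coverage with the same literal code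
-- (A's _qm_covers / B's _covers and the identical dict comprehension).

-- format(term, 'b'): binary digits of a natural number (most significant first)
def pvBits (n : Nat) : List Char :=
  if _h : n = 0 then [] else pvBits (n / 2) ++ [if n % 2 = 1 then '1' else '0']
decreasing_by exact Nat.div_lt_self (Nat.pos_of_ne_zero _h) (by norm_num)

-- format(term, 'b') including the sign, then format(term, f'0{w}b') = that, zero-filled
def pvBinRepr (t : Int) : List Char :=
  if t < 0 then '-' :: pvBits t.natAbs else if t = 0 then ['0'] else pvBits t.toNat

-- _qm_covers(prime, term, num_vars)  (exact: format(term, f'0{w}b') = zfill of format(term,'b'))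
def pvCovers (prime : String) (term : Int) (num_vars : Int) : Bool :=
  (prime.toList.zip (PySem.Chars.zfill (pvBinRepr term) num_vars)).all
    (fun pm => pm.1 == '-' || pm.1 == pm.2)

-- {p: {m for m in must_cover if _qm_covers(p, m, num_vars)} for p in primes}
def pvCoverage (primes : List String) (must_cover : List Int) (num_vars : Int) :
    PySem.Dict String (PySem.Set Int) :=
  primes.foldl
    (fun d p => d.insert p (PySem.Set.ofList (must_cover.filter (fun m => pvCovers p m num_vars))))
    PySem.Dict.empty

-- [p for p in primes if m in coverage[p]]
def pvCoversM (primes : List String) (coverage : PySem.Dict String (PySem.Set Int)) (m : Int) :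
    List String :=
  primes.filter (fun p => PySem.Set.contains (coverage.getD p PySem.Set.empty) m)

-- one iteration of A's essential for-loop; state = (selected, remaining, essential_added)
def pvEssStepA (primes : List String) (coverage : PySem.Dict String (PySem.Set Int))
    (st : PySem.Set String × PySem.Set Int × Bool) (m : Int) :
    PySem.Set String × PySem.Set Int × Bool :=
  match pvCoversM primes coverage m with
  | [p] =>
      let sf : PySem.Set String × Bool :=
        if PySem.Set.contains st.1 p then (st.1, st.2.2) else (PySem.Set.add st.1 p, true)
      (sf.1, PySem.Set.diff st.2.1 (coverage.getD p PySem.Set.empty), sf.2)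
  | _ => st

-- A's greedy scan: best, best_n = None, -1; for p in primes: ...
def pvGreedyA (primes : List String) (coverage : PySem.Dict String (PySem.Set Int))
    (rem : PySem.Set Int) : Option String × Int :=
  primes.foldl
    (fun bn p =>
      let n : Int := ((PySem.Set.inter (coverage.getD p PySem.Set.empty) rem).length : Int)
      if n > bn.2 then (some p, n) else bn)
    (none, -1)

-- A's while loop; fuel totalizes it (len(must_cover)+1 iterations always suffice:
-- every iteration that neither returns nor ends removes a remaining term)
def pvLoopA (primes : List String) (coverage : PySem.Dict String (PySem.Set Int)) :
    Nat → PySem.Set String → PySem.Set Int → PySem.Set String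
  | 0, sel, _ => sel
  | fuel + 1, sel, rem =>
    if rem = [] then sel
    else
      let st := rem.foldl (pvEssStepA primes coverage) (sel, rem, false)
      if st.2.1 ≠ [] ∧ st.2.2 = false then
        let bn := pvGreedyA primes coverage st.2.1
        match bn.1 with
        | none => st.1
        | some b =>
          if bn.2 ≤ 0 then st.1
          else
            pvLoopA primes coverage fuel (PySem.Set.add st.1 b)
              (PySem.Set.diff st.2.1 (coverage.getD b PySem.Set.empty))
      else pvLoopA primes coverage fuel st.1 st.2.1

def qm_minimum_cover_py (primes : List String) (must_cover : List Int) (num_vars : Int) :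
    List String :=
  if must_cover = [] then []
  else
    let coverage := pvCoverage primes must_cover num_vars
    pvLoopA primes coverage (must_cover.length + 1) PySem.Set.empty (PySem.Set.ofList must_cover)

-- ===== PORT B =====
-- idx = {m: [p for p in primes if m in coverage[p]] for m in must_cover}
def pvIdxB (primes : List String) (must_cover : List Int)
    (coverage : PySem.Dict String (PySem.Set Int)) : PySem.Dict Int (List String) :=
  must_cover.foldl (fun d m => d.insert m (pvCoversM primes coverage m)) PySem.Dict.empty

-- B's single essential pass; state = (selected, remaining)
def pvEssStepB (coverage : PySem.Dict String (PySem.Set Int)) (idx : PySem.Dict Int (List String))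
    (st : PySem.Set String × PySem.Set Int) (m : Int) : PySem.Set String × PySem.Set Int :=
  match idx.getD m [] with
  | [p] => (PySem.Set.add st.1 p, PySem.Set.diff st.2 (coverage.getD p PySem.Set.empty))
  | _ => st

-- B's greedy while loop: best = max(primes, key=..., default=None); fuel totalizes it
-- (len(must_cover) iterations always suffice: every pick removes a remaining term)
def pvLoopB (primes : List String) (coverage : PySem.Dict String (PySem.Set Int)) :
    Nat → PySem.Set String → PySem.Set Int → PySem.Set String
  | 0, sel, _ => sel
  | fuel + 1, sel, rem =>
    if rem = [] then sel
    else
      match PySem.List.max? primes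
          (fun p => ((PySem.Set.inter (coverage.getD p PySem.Set.empty) rem).length : Int)) with
      | none => sel
      | some b =>
        if PySem.Set.inter (coverage.getD b PySem.Set.empty) rem = [] then sel
        else
          pvLoopB primes coverage fuel (PySem.Set.add sel b)
            (PySem.Set.diff rem (coverage.getD b PySem.Set.empty))

def qm_minimum_cover_py_alt (primes : List String) (must_cover : List Int) (num_vars : Int) :
    List String :=
  if must_cover = [] then []
  else
    let coverage := pvCoverage primes must_cover num_vars
    let idx := pvIdxB primes must_cover coverage
    let st := must_cover.foldl (pvEssStepB coverage idx) (PySem.Set.empty, PySem.Set.ofList must_cover)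
    pvLoopB primes coverage must_cover.length st.1 st.2

-- ===== PRECONDITION & SPEC =====
-- Pre_ excludes only inputs where Python A raises: with primes and must_cover both
-- nonempty, format(term, f'0{num_vars}b') raises ValueError for negative num_vars.
def Pre_qm_minimum_cover_py (primes : List String) (must_cover : List Int) (num_vars : Int) : Prop :=
  primes = [] ∨ must_cover = [] ∨ 0 ≤ num_vars

instance (primes : List String) (must_cover : List Int) (num_vars : Int) :
    Decidable (Pre_qm_minimum_cover_py primes must_cover num_vars) := by
  unfold Pre_qm_minimum_cover_py; infer_instance

def pvWitness_qm_minimum_cover_py : List String × List Int × Int := (["1-", "01"], [2, 3, 1], 2)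

def Spec_qm_minimum_cover_py (primes : List String) (must_cover : List Int) (num_vars : Int) (out : List String) : Prop := out = qm_minimum_cover_py_alt primes must_cover num_vars
instance (primes : List String) (must_cover : List Int) (num_vars : Int) (out : List String) : Decidable (Spec_qm_minimum_cover_py primes must_cover num_vars out) := by unfold Spec_qm_minimum_cover_py; infer_instance

-- ===== CLAIM (what is proved, stated in full; the proofs are below) =====
def Claim_equal_qm_minimum_cover_py : Prop := ∀ (primes : List String) (must_cover : List Int) (num_vars : Int), Dom_qm_minimum_cover_py primes must_cover num_vars → Pre_qm_minimum_cover_py primes must_cover num_vars → Spec_qm_minimum_cover_py primes must_cover num_vars (qm_minimum_cover_py primes must_cover num_vars)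

-- ===== LEMMAS AND PROOFS =====

-- proof-side essential step: the (selected, remaining) action shared by both passes
def pvG (primes : List String) (coverage : PySem.Dict String (PySem.Set Int))
    (st : PySem.Set String × PySem.Set Int) (m : Int) : PySem.Set String × PySem.Set Int :=
  match pvCoversM primes coverage m with
  | [p] => (PySem.Set.add st.1 p, PySem.Set.diff st.2 (coverage.getD p PySem.Set.empty))
  | _ => st

-- "m was already processed": its unique cover is selected and m's cover is gone from remaining
def pvP (primes : List String) (coverage : PySem.Dict String (PySem.Set Int))
    (st : PySem.Set String × PySem.Set Int) (m : Int) : Prop :=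
  ∀ p, pvCoversM primes coverage m = [p] →
    p ∈ st.1 ∧ ∀ x ∈ st.2, PySem.Set.contains (coverage.getD p PySem.Set.empty) x = false

theorem pvG_mono (primes : List String) (coverage : PySem.Dict String (PySem.Set Int))
    (st : PySem.Set String × PySem.Set Int) (m : Int) :
    (∀ q, q ∈ st.1 → q ∈ (pvG primes coverage st m).1) ∧
    (∀ x, x ∈ (pvG primes coverage st m).2 → x ∈ st.2) := by
  unfold pvG
  split
  · exact ⟨fun q hq => (PySem.Set.mem_add _ _ _).mpr (Or.inl hq),
      fun x hx => ((PySem.Set.mem_diff _ _ _).mp hx).1⟩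
  · exact ⟨fun q hq => hq, fun x hx => hx⟩

theorem pvP_pres (primes : List String) (coverage : PySem.Dict String (PySem.Set Int))
    (st : PySem.Set String × PySem.Set Int) (m m' : Int)
    (h : pvP primes coverage st m') : pvP primes coverage (pvG primes coverage st m) m' := by
  intro p hp
  obtain ⟨h1, h2⟩ := h p hp
  exact ⟨(pvG_mono primes coverage st m).1 p h1,
    fun x hx => h2 x ((pvG_mono primes coverage st m).2 x hx)⟩

theorem pvP_estab (primes : List String) (coverage : PySem.Dict String (PySem.Set Int))
    (st : PySem.Set String × PySem.Set Int) (m : Int) :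
    pvP primes coverage (pvG primes coverage st m) m := by
  intro p hp
  simp only [pvG, hp]
  refine ⟨(PySem.Set.mem_add _ _ _).mpr (Or.inr rfl), fun x hx => ?_⟩
  have hnm := ((PySem.Set.mem_diff _ _ _).mp hx).2
  exact Bool.eq_false_iff.mpr (fun hc => hnm ((PySem.Set.contains_iff _ _).mp hc))

theorem pvP_fold_pres (primes : List String) (coverage : PySem.Dict String (PySem.Set Int))
    (ms : List Int) (st : PySem.Set String × PySem.Set Int) (m : Int)
    (h : pvP primes coverage st m) :
    pvP primes coverage (ms.foldl (pvG primes coverage) st) m := by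
  induction ms generalizing st with
  | nil => exact h
  | cons x xs ih => exact ih _ (pvP_pres primes coverage st x m h)

theorem pvP_fold (primes : List String) (coverage : PySem.Dict String (PySem.Set Int))
    (ms : List Int) (st : PySem.Set String × PySem.Set Int) (m : Int) (hm : m ∈ ms) :
    pvP primes coverage (ms.foldl (pvG primes coverage) st) m := by
  induction ms generalizing st with
  | nil => cases hm
  | cons x xs ih =>
    rcases List.mem_cons.mp hm with h | h
    · subst h
      exact pvP_fold_pres primes coverage xs _ m (pvP_estab primes coverage st m)
    · exact ih _ h

theorem pvG_noop (primes : List String) (coverage : PySem.Dict String (PySem.Set Int))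
    (st : PySem.Set String × PySem.Set Int) (m : Int) (h : pvP primes coverage st m) :
    pvG primes coverage st m = st := by
  unfold pvG
  split
  · next p hp =>
    obtain ⟨h1, h2⟩ := h p hp
    refine Prod.ext (PySem.Set.add_of_mem h1) ?_
    show PySem.Set.diff st.2 _ = st.2
    unfold PySem.Set.diff
    apply List.filter_eq_self.mpr
    intro x hx
    have h3 := h2 x hx
    simp only [PySem.Set.contains_eq_listContains] at h3
    simpa using h3
  · rfl

-- folding the essential action over set(l) is the same as folding it over l
theorem pvG_fold_dedup (primes : List String) (coverage : PySem.Dict String (PySem.Set Int))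
    (l : List Int) (st : PySem.Set String × PySem.Set Int) :
    (PySem.Set.ofList l).foldl (pvG primes coverage) st = l.foldl (pvG primes coverage) st := by
  induction l using List.reverseRecOn generalizing st with
  | nil => rfl
  | append_singleton l x ih =>
    rw [PySem.Set.ofList_append_singleton]
    by_cases hx : x ∈ l
    · rw [PySem.Set.add_of_mem ((PySem.Set.mem_ofList _ _).mpr hx), ih, List.foldl_append]
      simp only [List.foldl_cons, List.foldl_nil]
      exact (pvG_noop primes coverage _ x (pvP_fold primes coverage l st x hx)).symm
    · rw [PySem.Set.add_of_not_mem (fun hc => hx ((PySem.Set.mem_ofList _ _).mp hc)),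
        List.foldl_append, List.foldl_append, ih]

theorem pvG_fold_remsub (primes : List String) (coverage : PySem.Dict String (PySem.Set Int))
    (ms : List Int) (st : PySem.Set String × PySem.Set Int) (x : Int)
    (hx : x ∈ (ms.foldl (pvG primes coverage) st).2) : x ∈ st.2 := by
  induction ms generalizing st with
  | nil => exact hx
  | cons y ys ih =>
    exact (pvG_mono primes coverage st y).2 x (ih _ hx)

-- A's pass and the flagless action agree on (selected, remaining)
theorem pvEssA_proj (primes : List String) (coverage : PySem.Dict String (PySem.Set Int))
    (ms : List Int) (s : PySem.Set String) (r : PySem.Set Int) (a : Bool) :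
    ((ms.foldl (pvEssStepA primes coverage) (s, r, a)).1,
     (ms.foldl (pvEssStepA primes coverage) (s, r, a)).2.1) =
    ms.foldl (pvG primes coverage) (s, r) := by
  induction ms generalizing s r a with
  | nil => rfl
  | cons m ms ih =>
    simp only [List.foldl_cons]
    have hstep : ∃ a', pvEssStepA primes coverage (s, r, a) m =
        ((pvG primes coverage (s, r) m).1, (pvG primes coverage (s, r) m).2, a') := by
      unfold pvEssStepA pvG
      split
      · next p hp =>
        by_cases hc : p ∈ s
        · have hcc : PySem.Set.contains s p = true := (PySem.Set.contains_iff _ _).mpr hc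
          exact ⟨a, by simp [hc]⟩
        · have hcc : PySem.Set.contains s p = false :=
            Bool.eq_false_iff.mpr (fun h => hc ((PySem.Set.contains_iff _ _).mp h))
          exact ⟨true, by simp [hc]⟩
      · exact ⟨a, rfl⟩
    obtain ⟨a', ha'⟩ := hstep
    rw [ha']
    exact ih _ _ _

theorem pvEssA_flag_mono (primes : List String) (coverage : PySem.Dict String (PySem.Set Int))
    (ms : List Int) (s : PySem.Set String) (r : PySem.Set Int) :
    (ms.foldl (pvEssStepA primes coverage) (s, r, true)).2.2 = true := by
  induction ms generalizing s r with
  | nil => rfl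
  | cons m ms ih =>
    simp only [List.foldl_cons]
    have hstep : ∃ s' r', pvEssStepA primes coverage (s, r, true) m = (s', r', true) := by
      unfold pvEssStepA
      split
      · next p hp =>
        by_cases hc : p ∈ s
        · have hcc : PySem.Set.contains s p = true := (PySem.Set.contains_iff _ _).mpr hc
          exact ⟨s, PySem.Set.diff r (coverage.getD p PySem.Set.empty), by simp [hc]⟩
        · have hcc : PySem.Set.contains s p = false :=
            Bool.eq_false_iff.mpr (fun h => hc ((PySem.Set.contains_iff _ _).mp h))
          exact ⟨PySem.Set.add s p, PySem.Set.diff r (coverage.getD p PySem.Set.empty), by simp [hc]⟩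
      · exact ⟨s, r, rfl⟩
    obtain ⟨s', r', h⟩ := hstep
    rw [h]
    exact ih s' r' 

-- if the flag stays false starting from empty selected, the pass was a no-op
theorem pvEssA_false (primes : List String) (coverage : PySem.Dict String (PySem.Set Int))
    (ms : List Int) (r : PySem.Set Int)
    (h : (ms.foldl (pvEssStepA primes coverage) (PySem.Set.empty, r, false)).2.2 = false) :
    ms.foldl (pvEssStepA primes coverage) (PySem.Set.empty, r, false) = (PySem.Set.empty, r, false) ∧
    ∀ m ∈ ms, ∀ p, pvCoversM primes coverage m ≠ [p] := by
  induction ms generalizing r with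
  | nil => exact ⟨rfl, by simp⟩
  | cons m ms ih =>
    simp only [List.foldl_cons] at h ⊢
    have hstep : pvEssStepA primes coverage (PySem.Set.empty, r, false) m =
        (PySem.Set.empty, r, false) := by
      cases hf : pvCoversM primes coverage m with
      | nil => simp [pvEssStepA, hf]
      | cons p t =>
        cases t with
        | nil =>
          exfalso
          have : pvEssStepA primes coverage (PySem.Set.empty, r, false) m =
              (PySem.Set.add PySem.Set.empty p,
               PySem.Set.diff r (coverage.getD p PySem.Set.empty), true) := by
            simp [pvEssStepA, hf]
          rw [this] at h
          rw [pvEssA_flag_mono] at h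
          exact Bool.true_eq_false.mp h
        | cons q t' => simp [pvEssStepA, hf]
    rw [hstep] at h ⊢
    obtain ⟨h1, h2⟩ := ih r h
    refine ⟨h1, fun x hx p hp => ?_⟩
    rcases List.mem_cons.mp hx with hx | hx
    · subst hx
      simp only [pvEssStepA, hp] at hstep
      have := congrArg (fun z => z.2.2) hstep
      simp at this
    · exact h2 x hx p hp

-- after folding over ms starting at remaining = r ⊆ ms, no remaining term has a unique cover
theorem pvInv_after (primes : List String) (coverage : PySem.Dict String (PySem.Set Int))
    (ms : List Int) (st : PySem.Set String × PySem.Set Int) (m : Int)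
    (hm : m ∈ (ms.foldl (pvG primes coverage) st).2) (hms : m ∈ ms) :
    ∀ p, pvCoversM primes coverage m ≠ [p] := by
  intro p hp
  obtain ⟨_, h2⟩ := pvP_fold primes coverage ms st m hms p hp
  have hmem : p ∈ pvCoversM primes coverage m := by rw [hp]; exact List.mem_singleton.mpr rfl
  have := (List.mem_filter.mp hmem).2
  rw [h2 m hm] at this
  exact Bool.false_ne_true this

-- an essential pass over remaining terms none of which has a unique cover is the identity
theorem pvEssA_noop (primes : List String) (coverage : PySem.Dict String (PySem.Set Int))
    (rem : PySem.Set Int) (sel : PySem.Set String)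
    (hinv : ∀ m ∈ rem, ∀ p, pvCoversM primes coverage m ≠ [p]) :
    rem.foldl (pvEssStepA primes coverage) (sel, rem, false) = (sel, rem, false) := by
  have h : ∀ (acc : PySem.Set String × PySem.Set Int × Bool) (m : Int), m ∈ rem →
      pvEssStepA primes coverage acc m = acc := by
    intro acc m hm
    cases hf : pvCoversM primes coverage m with
    | nil => simp [pvEssStepA, hf]
    | cons p t =>
      cases t with
      | nil => exact absurd hf (hinv m hm p)
      | cons q t' => simp [pvEssStepA, hf]
  rw [PySem.List.foldl_congr_mem _ _ (fun acc _ => acc) _ (fun acc x hx => h acc x hx),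
    PySem.List.foldl_ignore]

-- max(x::t) is the running-max loop from x
theorem pvMax_cons (key : String → Int) : ∀ (t : List String) (x : String),
    PySem.List.max? (x :: t) key
    = some (t.foldl (fun m x => if key m < key x then x else m) x) := by
  intro t
  induction t with
  | nil => intro x; rfl
  | cons y t ih =>
    intro x
    have h1 : PySem.List.max? (x :: y :: t) key
        = PySem.List.max? ((if key x < key y then y else x) :: t) key := by
      by_cases h : key x < key y <;>
        simp [PySem.List.max?, List.foldl_cons, h]
    rw [h1, ih]
    simp only [List.foldl_cons]

theorem pvMaxA_go (key : String → Int) : ∀ (t : List String) (b : String),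
    t.foldl (fun bn p => if key p > bn.2 then (some p, key p) else bn)
      ((some b, key b) : Option String × Int)
    = (some (t.foldl (fun m x => if key m < key x then x else m) b),
       key (t.foldl (fun m x => if key m < key x then x else m) b)) := by
  intro t
  induction t with
  | nil => intro b; rfl
  | cons x t ih =>
    intro b
    simp only [List.foldl_cons]
    by_cases h : key b < key x
    · simp only [gt_iff_lt, if_pos h]; exact ih x
    · simp only [gt_iff_lt, if_neg h]; exact ih b

-- A's first-max scan IS max(primes, key=..., default=None) for a nonnegative key
theorem pvMaxEq (primes : List String) (key : String → Int) (hkey : ∀ p, 0 ≤ key p) :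
    primes.foldl (fun bn p => if key p > bn.2 then (some p, key p) else bn)
      ((none, -1) : Option String × Int) =
    match PySem.List.max? primes key with
    | none => (none, -1)
    | some b => (some b, key b) := by
  cases primes with
  | nil => rfl
  | cons x t =>
    have h0 : (-1 : Int) < key x := lt_of_lt_of_le (by norm_num) (hkey x)
    have l1 : (x :: t).foldl (fun bn p => if key p > bn.2 then (some p, key p) else bn)
        ((none, -1) : Option String × Int)
        = t.foldl (fun bn p => if key p > bn.2 then (some p, key p) else bn) (some x, key x) := by
      simp only [List.foldl_cons]
      congr 1
      simp [h0]
    rw [l1, pvMaxA_go key t x, pvMax_cons key t x]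

-- A's greedy scan as max(primes, key=..., default=None)
theorem pvGreedyA_eq (primes : List String) (coverage : PySem.Dict String (PySem.Set Int))
    (rem : PySem.Set Int) :
    pvGreedyA primes coverage rem =
    match PySem.List.max? primes
        (fun p => ((PySem.Set.inter (coverage.getD p PySem.Set.empty) rem).length : Int)) with
    | none => (none, -1)
    | some b => (some b, ((PySem.Set.inter (coverage.getD b PySem.Set.empty) rem).length : Int)) := by
  exact pvMaxEq primes _ (fun p => Int.natCast_nonneg _)

-- IDX lookup: for m in must_cover, idx[m] is covers_m
theorem pvIdx_getD (primes : List String) (must_cover : List Int)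
    (coverage : PySem.Dict String (PySem.Set Int)) (m : Int) (hm : m ∈ must_cover) :
    (pvIdxB primes must_cover coverage).getD m [] = pvCoversM primes coverage m := by
  unfold pvIdxB
  induction must_cover using List.reverseRecOn with
  | nil => cases hm
  | append_singleton l x ih =>
    rw [List.foldl_append]
    simp only [List.foldl_cons, List.foldl_nil]
    rw [PySem.Dict.getD_insert]
    by_cases hx : m = x
    · rw [if_pos hx, hx]
    · rw [if_neg hx]
      rcases List.mem_append.mp hm with h | h
      · exact ih h
      · simp only [List.mem_singleton] at h
        exact absurd h hx

theorem pvLoopB_nil (primes : List String) (coverage : PySem.Dict String (PySem.Set Int))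
    (f : Nat) (sel : PySem.Set String) : pvLoopB primes coverage f sel [] = sel := by
  cases f <;> simp [pvLoopB]

-- B's fueled loop is insensitive to the fuel once it is ≥ |remaining|
theorem pvLoopB_suff (primes : List String) (coverage : PySem.Dict String (PySem.Set Int)) :
    ∀ (f f' : Nat) (sel : PySem.Set String) (rem : PySem.Set Int),
      rem.length ≤ f → rem.length ≤ f' →
      pvLoopB primes coverage f sel rem = pvLoopB primes coverage f' sel rem := by
  intro f
  induction f with
  | zero =>
    intro f' sel rem h _
    have hr : rem = [] := List.eq_nil_of_length_eq_zero (Nat.le_zero.mp h)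
    subst hr
    rw [pvLoopB_nil, pvLoopB_nil]
  | succ f ih =>
    intro f' sel rem h h'
    cases f' with
    | zero =>
      have hr : rem = [] := List.eq_nil_of_length_eq_zero (Nat.le_zero.mp h')
      subst hr
      rw [pvLoopB_nil, pvLoopB_nil]
    | succ f'' =>
      by_cases hrem : rem = []
      · subst hrem; rw [pvLoopB_nil, pvLoopB_nil]
      · simp only [pvLoopB, if_neg hrem]
        cases hb : PySem.List.max? primes
            (fun p => ((PySem.Set.inter (coverage.getD p PySem.Set.empty) rem).length : Int)) with
        | none => rfl
        | some b =>
          simp only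
          by_cases hi : PySem.Set.inter (coverage.getD b PySem.Set.empty) rem = []
          · rw [if_pos hi, if_pos hi]
          · rw [if_neg hi, if_neg hi]
            have hlt : (PySem.Set.diff rem (coverage.getD b PySem.Set.empty)).length < rem.length := by
              obtain ⟨y, hy⟩ := List.exists_mem_of_ne_nil _ hi
              simp only [PySem.Set.inter] at hy
              have hy' := List.mem_filter.mp hy
              apply List.length_filter_lt_length_iff_exists.mpr
              refine ⟨y, (PySem.Set.contains_iff _ _).mp hy'.2, ?_⟩
              simpa using hy'.1
            exact ih _ _ _ (by omega) (by omega)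

-- with no uniquely-covered remaining term, A's loop IS B's loop at the same fuel
theorem pvGreedyEq (primes : List String) (coverage : PySem.Dict String (PySem.Set Int)) :
    ∀ (f : Nat) (sel : PySem.Set String) (rem : PySem.Set Int),
      (∀ m ∈ rem, ∀ p, pvCoversM primes coverage m ≠ [p]) →
      pvLoopA primes coverage f sel rem = pvLoopB primes coverage f sel rem := by
  intro f
  induction f with
  | zero => intro sel rem _; rfl
  | succ f ih =>
    intro sel rem hinv
    by_cases hrem : rem = []
    · subst hrem; simp [pvLoopA, pvLoopB]
    · simp only [pvLoopA, pvLoopB, if_neg hrem]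
      rw [pvEssA_noop primes coverage rem sel hinv]
      rw [if_pos ⟨hrem, rfl⟩]
      rw [pvGreedyA_eq]
      cases hb : PySem.List.max? primes
          (fun p => ((PySem.Set.inter (coverage.getD p PySem.Set.empty) rem).length : Int)) with
      | none => rfl
      | some b =>
        simp only
        by_cases hi : PySem.Set.inter (coverage.getD b PySem.Set.empty) rem = []
        · have hA : ((PySem.Set.inter (coverage.getD b PySem.Set.empty) rem).length : Int) ≤ 0 := by
            rw [hi]; simp
          rw [if_pos hA, if_pos hi]
        · have hlen : 0 < ((PySem.Set.inter (coverage.getD b PySem.Set.empty) rem).length : Int) := by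
            have := List.length_pos_of_ne_nil hi
            exact_mod_cast this
          rw [if_neg hi, if_neg (not_le.mpr hlen)]
          exact ih _ _ (fun m hm => hinv m ((PySem.Set.mem_diff _ _ _).mp hm).1)

-- the heart: A's fueled while loop equals B's essential pass + fueled greedy loop
theorem pvMain (primes : List String) (coverage : PySem.Dict String (PySem.Set Int))
    (must_cover : List Int) (hmc : must_cover ≠ []) :
    pvLoopA primes coverage (must_cover.length + 1) PySem.Set.empty
      (PySem.Set.ofList must_cover) =
    pvLoopB primes coverage must_cover.length
      (must_cover.foldl (pvG primes coverage)
        (PySem.Set.empty, PySem.Set.ofList must_cover)).1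
      (must_cover.foldl (pvG primes coverage)
        (PySem.Set.empty, PySem.Set.ofList must_cover)).2 := by
  have hms_ne : PySem.Set.ofList must_cover ≠ [] := by
    cases must_cover with
    | nil => exact absurd rfl hmc
    | cons m mc =>
      exact List.ne_nil_of_mem ((PySem.Set.mem_ofList _ _).mpr List.mem_cons_self)
  obtain ⟨N', hN'⟩ : ∃ k, must_cover.length = k + 1 := by
    cases must_cover with
    | nil => exact absurd rfl hmc
    | cons m mc => exact ⟨mc.length, rfl⟩
  have hproj := pvEssA_proj primes coverage (PySem.Set.ofList must_cover)
    PySem.Set.empty (PySem.Set.ofList must_cover) false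
  rw [pvG_fold_dedup] at hproj
  have hinvF : ∀ m ∈ (must_cover.foldl (pvG primes coverage)
      (PySem.Set.empty, PySem.Set.ofList must_cover)).2,
      ∀ p, pvCoversM primes coverage m ≠ [p] := by
    intro m hm
    have hmem : m ∈ must_cover := (PySem.Set.mem_ofList _ _).mp
      (pvG_fold_remsub primes coverage must_cover _ m hm)
    exact pvInv_after primes coverage must_cover _ m hm hmem
  conv_lhs => rw [pvLoopA]
  rw [if_neg hms_ne]
  cases hflag : ((PySem.Set.ofList must_cover).foldl (pvEssStepA primes coverage)
      (PySem.Set.empty, PySem.Set.ofList must_cover, false)).2.2 with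
  | true =>
    -- essentials were added in the first iteration: the rest is the pure greedy loop
    have hflag' : ((PySem.Set.ofList must_cover).foldl (pvEssStepA primes coverage)
        (PySem.Set.empty, PySem.Set.ofList must_cover, false)).2.2 = false → False := by
      intro h; rw [hflag] at h; cases h
    rw [if_neg (fun hcond => hflag' hcond.2)]
    have h1 := congrArg Prod.fst hproj
    have h2 := congrArg Prod.snd hproj
    simp only at h1 h2
    rw [h1, h2]
    exact pvGreedyEq primes coverage must_cover.length _ _ hinvF
  | false =>
    -- no essentials at all: the pass was a no-op and A greedily picks at once
    obtain ⟨hid, hnone⟩ := pvEssA_false primes coverage (PySem.Set.ofList must_cover)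
      (PySem.Set.ofList must_cover) hflag
    have hinv0 : ∀ m ∈ (PySem.Set.ofList must_cover), ∀ p,
        pvCoversM primes coverage m ≠ [p] := hnone
    have hFid : must_cover.foldl (pvG primes coverage)
        (PySem.Set.empty, PySem.Set.ofList must_cover)
        = (PySem.Set.empty, PySem.Set.ofList must_cover) := by
      rw [← hproj, hid]
    rw [hid, hFid]
    rw [if_pos ⟨hms_ne, rfl⟩]
    rw [pvGreedyA_eq]
    conv_rhs => rw [hN', pvLoopB]
    rw [if_neg hms_ne]
    cases hb : PySem.List.max? primes (fun p =>
        ((PySem.Set.inter (coverage.getD p PySem.Set.empty)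
          (PySem.Set.ofList must_cover)).length : Int)) with
    | none => rfl
    | some b =>
      simp only
      by_cases hi : PySem.Set.inter (coverage.getD b PySem.Set.empty)
          (PySem.Set.ofList must_cover) = []
      · have hA : ((PySem.Set.inter (coverage.getD b PySem.Set.empty)
            (PySem.Set.ofList must_cover)).length : Int) ≤ 0 := by
          rw [hi]; simp
        rw [if_pos hA, if_pos hi]
      · have hlen : 0 < ((PySem.Set.inter (coverage.getD b PySem.Set.empty)
            (PySem.Set.ofList must_cover)).length : Int) := by
          have := List.length_pos_of_ne_nil hi
          exact_mod_cast this
        rw [if_neg (not_le.mpr hlen), if_neg hi]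
        have hinv' : ∀ m ∈ PySem.Set.diff (PySem.Set.ofList must_cover)
            (coverage.getD b PySem.Set.empty), ∀ p, pvCoversM primes coverage m ≠ [p] :=
          fun m hm => hinv0 m ((PySem.Set.mem_diff _ _ _).mp hm).1
        rw [pvGreedyEq primes coverage must_cover.length _ _ hinv']
        apply pvLoopB_suff
        · -- |remaining after the pick| ≤ len(must_cover)
          have := PySem.Set.length_ofList_le must_cover
          have hle : (PySem.Set.diff (PySem.Set.ofList must_cover)
              (coverage.getD b PySem.Set.empty)).length
              ≤ (PySem.Set.ofList must_cover).length := by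
            simp only [PySem.Set.diff]
            exact List.Sublist.length_le List.filter_sublist
          omega
        · -- and < it strictly, so ≤ N'
          have hlt : (PySem.Set.diff (PySem.Set.ofList must_cover)
              (coverage.getD b PySem.Set.empty)).length
              < (PySem.Set.ofList must_cover).length := by
            obtain ⟨y, hy⟩ := List.exists_mem_of_ne_nil _ hi
            simp only [PySem.Set.inter] at hy
            have hy' := List.mem_filter.mp hy
            apply List.length_filter_lt_length_iff_exists.mpr
            refine ⟨y, (PySem.Set.contains_iff _ _).mp hy'.2, ?_⟩
            simpa using hy'.1
          have := PySem.Set.length_ofList_le must_cover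
          omega

-- ===== VERDICT (by name: the statement is the Claim_ definition above) =====
theorem qm_minimum_cover_py_spec : Claim_equal_qm_minimum_cover_py := by
  unfold Claim_equal_qm_minimum_cover_py
  intro primes must_cover num_vars _dom _pre
  unfold Spec_qm_minimum_cover_py qm_minimum_cover_py qm_minimum_cover_py_alt
  by_cases hmc : must_cover = []
  · simp [hmc]
  · simp only [if_neg hmc]
    have hB : must_cover.foldl
        (pvEssStepB (pvCoverage primes must_cover num_vars)
          (pvIdxB primes must_cover (pvCoverage primes must_cover num_vars)))
        (PySem.Set.empty, PySem.Set.ofList must_cover)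
        = must_cover.foldl (pvG primes (pvCoverage primes must_cover num_vars))
        (PySem.Set.empty, PySem.Set.ofList must_cover) := by
      apply PySem.List.foldl_congr_mem
      intro acc m hm
      unfold pvEssStepB pvG
      rw [pvIdx_getD primes must_cover (pvCoverage primes must_cover num_vars) m hm]
    rw [hB]
    exact pvMain primes (pvCoverage primes must_cover num_vars) must_cover hmc
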